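-- pv_equiv track=rewrite | github.com/aartipm2025-max/indmoney-ops-suite-FP | tests/test_p2_data.py | _has_frontmatter_key
-- ===== SOURCE A (Python) =====
-- def _has_frontmatter_key(text: str, key: str) -> bool:
--     in_fm = False
--     for i, line in enumerate(text.splitlines()):
--         if i == 0 and line.strip() == "---":
--             in_fm = True
--             continue
--         if in_fm:
--             if line.strip() == "---":
--                 break
--             if line.strip().startswith(key):
--                 return True
--     return False
-- ===== SOURCE B (Python) =====
-- def _has_frontmatter_key(text: str, key: str) -> bool:
--     stripped = [l.strip() for l in text.splitlines()]
--     if stripped[:1] != ["---"]: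
--         return False
--     body = stripped[1:]
--     close = next((i for i, s in enumerate(body) if s == "---"), len(body))
--     hit = next((i for i, s in enumerate(body) if s.startswith(key)), len(body))
--     return hit < close
-- ===== Notes on version B (the rewrite author's own statement) =====
-- stated objective: alternative
-- what changed: Replaces A's stateful region scan (in_fm flag, break/early-return inside the frontmatter) by two independent first-occurrence searches over the stripped body -- the index of the first closing '---' and the index of the first key-prefixed line -- and returns the comparison hit < close; no frontmatter region is ever delimited or scanned as such.
import Mathlib
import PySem

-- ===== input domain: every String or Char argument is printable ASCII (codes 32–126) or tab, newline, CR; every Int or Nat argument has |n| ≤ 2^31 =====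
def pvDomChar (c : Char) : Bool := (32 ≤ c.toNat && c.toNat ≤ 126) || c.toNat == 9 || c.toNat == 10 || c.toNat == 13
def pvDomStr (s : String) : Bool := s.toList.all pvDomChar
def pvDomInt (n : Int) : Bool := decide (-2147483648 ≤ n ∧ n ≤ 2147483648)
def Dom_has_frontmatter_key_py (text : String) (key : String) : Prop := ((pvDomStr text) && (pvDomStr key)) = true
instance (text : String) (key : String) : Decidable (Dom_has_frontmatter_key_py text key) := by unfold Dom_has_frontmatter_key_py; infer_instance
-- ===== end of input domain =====

-- B replaces A's stateful region scan by two independent first-occurrence searches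
-- (first closing '---', first key-prefixed line) over the stripped body and compares
-- their indices; objective: alternative (same cost, different algorithmic shape).

-- ===== PORT A =====
-- A's for-loop over enumerate(text.splitlines()) with the in_fm flag, continue, break and early return.
def hasFmLoopA (key : String) : Bool → Nat → List String → Bool
  | _, _, [] => false
  | in_fm, i, l :: rest =>
    if i == 0 && PySem.Str.strip l == "---" then hasFmLoopA key true (i + 1) rest
    else if in_fm then
      if PySem.Str.strip l == "---" then false           -- break
      else if PySem.Str.startswith (PySem.Str.strip l) key then true   -- return True
      else hasFmLoopA key in_fm (i + 1) rest
    else hasFmLoopA key in_fm (i + 1) rest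

def has_frontmatter_key_py (text : String) (key : String) : Bool :=
  hasFmLoopA key false 0 (PySem.Str.splitlines text)

-- ===== PORT B =====
-- Source B's `next((i for i, s in enumerate(xs) if p s), len(xs))`: index of the first
-- element satisfying p, or the length if none.
def pvFirstIdx (p : String → Bool) : List String → Nat
  | [] => 0
  | s :: rest => if p s then 0 else pvFirstIdx p rest + 1

def has_frontmatter_key_py_alt (text : String) (key : String) : Bool :=
  let stripped := (PySem.Str.splitlines text).map PySem.Str.strip
  if stripped.take 1 ≠ ["---"] then false
  else
    let body := stripped.drop 1
    let close := pvFirstIdx (fun s => s == "---") body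
    let hit := pvFirstIdx (fun s => PySem.Str.startswith s key) body
    decide (hit < close)

-- ===== PRECONDITION & SPEC =====
def Spec_has_frontmatter_key_py (text : String) (key : String) (out : Bool) : Prop := out = has_frontmatter_key_py_alt text key
instance (text : String) (key : String) (out : Bool) : Decidable (Spec_has_frontmatter_key_py text key out) := by unfold Spec_has_frontmatter_key_py; infer_instance

-- ===== CLAIM (what is proved, stated in full; the proofs are below) =====
def Claim_equal_has_frontmatter_key_py : Prop := ∀ (text : String) (key : String), Dom_has_frontmatter_key_py text key → Spec_has_frontmatter_key_py text key (has_frontmatter_key_py text key)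

-- ===== LEMMAS AND PROOFS =====

-- With in_fm = False past line 0, A's loop ignores every remaining line.
theorem hasFmLoopA_false (key : String) (ls : List String) (i : Nat) (h : i ≠ 0) :
    hasFmLoopA key false i ls = false := by
  induction ls generalizing i with
  | nil => rfl
  | cons l rest ih =>
    have hi : (i == 0) = false := by simpa using h
    simp [hasFmLoopA, hi, ih (i + 1) (Nat.succ_ne_zero i)]

-- Inside frontmatter (i ≠ 0), A's scan answers exactly "first key-hit before first boundary".
theorem hasFmLoopA_true (key : String) (ls : List String) (i : Nat) (h : i ≠ 0) :
    hasFmLoopA key true i ls =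
      decide (pvFirstIdx (fun s => PySem.Str.startswith s key) (ls.map PySem.Str.strip)
              < pvFirstIdx (fun s => s == "---") (ls.map PySem.Str.strip)) := by
  induction ls generalizing i with
  | nil => rfl
  | cons l rest ih =>
    have hi : (i == 0) = false := by simpa using h
    by_cases hb : PySem.Str.strip l = "---"
    · simp [hasFmLoopA, hi, hb, pvFirstIdx]
    · have hbe : (PySem.Str.strip l == "---") = false := by simpa using hb
      by_cases hs : PySem.Str.startswith (PySem.Str.strip l) key
      · simp only [hasFmLoopA, hi, hbe, hs, List.map_cons, pvFirstIdx, Bool.false_and,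
          Bool.false_eq_true, if_false, if_true]
        simp
      · have hse : (PySem.Str.startswith (PySem.Str.strip l) key) = false := by simpa using hs
        have ih' := ih (i + 1) (Nat.succ_ne_zero i)
        simp only [hasFmLoopA, hi, hbe, hse, List.map_cons, pvFirstIdx, Bool.false_and,
          Bool.false_eq_true, if_false, if_true, ih']
        simp

-- ===== VERDICT (by name: the statement is the Claim_ definition above) =====
theorem has_frontmatter_key_py_spec : Claim_equal_has_frontmatter_key_py := by
  intro text key _
  unfold Spec_has_frontmatter_key_py has_frontmatter_key_py has_frontmatter_key_py_alt
  rcases hsplit : PySem.Str.splitlines text with _ | ⟨l0, rest⟩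
  · rfl
  · by_cases hb : PySem.Str.strip l0 = "---"
    · simp only [hasFmLoopA, hb]
      simp [hb, hasFmLoopA_true key rest 1 one_ne_zero]
    · simp [hasFmLoopA, hb, hasFmLoopA_false key rest 1 one_ne_zero]
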